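-- pv_equiv track=rewrite | github.com/rladpwl35/coding_test | programmers/iter_bin.py | solution
-- ===== SOURCE A (Python) =====
-- def solution(s):
--     count = 0
--     repz  = 0
--     #1일때 까지 반복
--     while s != '1':
--         count += 1
--
--         #0으로 변환하고 변환 수 세기
--         for i in range(len(s)):
--             if s[i] == '0':
--                 repz += 1
--
--         s = s.replace('0', '')
--
--         length = len(s)
--
--         # 이진 변환
--         bin = ''
--         while length > 0:
--             bin += str(length % 2)
--             length = length // 2
--         s = bin[::-1]
--
--     answer = [count, repz]
--
--     return answer
-- ===== SOURCE B (Python) =====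
-- def solution(s):
--     if s == '1':
--         return [0, 0]
--     zeros0 = s.count('0')
--     ones = len(s) - zeros0
--     # Bottom-up DP: for every value k up to `ones`, tabulate the number of further
--     # steps and zeros removed on the chain k -> popcount(k) -> ... -> 1.
--     steps = [0, 0]
--     drops = [0, 0]
--     for k in range(2, ones + 1):
--         p = bin(k).count('1')
--         steps.append(steps[p] + 1)
--         drops.append(drops[p] + k.bit_length() - p)
--     return [steps[ones] + 1, drops[ones] + zeros0]
-- ===== Notes on version B (the rewrite author's own statement) =====
-- stated objective: alternative
-- what changed: B replaces A's chain-following string rewriting (scan zeros, replace('0',''), hand-built binary conversion each round) by bottom-up dynamic programming: it tabulates steps/zeros-removed for every value up to the initial ones-count and answers by one table lookup.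
-- outside the precondition, e.g. on solution('0'): A does not finish within the time limit, B returns [1, 1]; on solution(''): A does not finish within the time limit, B returns [1, 0]
import Mathlib
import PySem

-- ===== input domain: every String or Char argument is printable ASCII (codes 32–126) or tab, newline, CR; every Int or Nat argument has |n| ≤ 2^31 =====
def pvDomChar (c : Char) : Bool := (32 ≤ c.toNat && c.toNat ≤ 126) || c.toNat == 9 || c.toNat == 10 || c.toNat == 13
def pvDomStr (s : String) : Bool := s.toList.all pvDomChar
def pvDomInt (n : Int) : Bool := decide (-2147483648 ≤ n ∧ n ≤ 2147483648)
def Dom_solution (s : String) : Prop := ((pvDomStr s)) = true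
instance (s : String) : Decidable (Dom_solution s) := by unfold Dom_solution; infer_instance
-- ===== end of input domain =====

-- B replaces A's chain-following string rewriting by bottom-up dynamic programming:
-- it tabulates steps/zeros-removed for every value up to the initial count of
-- non-'0' characters and answers by one table lookup (same results, different algorithm).


-- ===== PORT A =====
-- inner "while length > 0: bin += str(length % 2); length = length // 2"
def toBin (length : Int) (bin : List Char) : List Char :=
  if 0 < length then
    toBin (PySem.Int.floordiv length 2) (bin ++ PySem.Int.toChars (PySem.Int.mod length 2))
  else bin
termination_by length.toNat
decreasing_by
  rw [PySem.Int.floordiv_eq_ediv_of_pos (by omega)]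
  omega

-- A's outer "while s != '1'" loop; the fuel argument only makes the recursion total:
-- it never runs out on an input admitted by Pre_solution (A diverges exactly on the rest).
def aLoop : Nat → List Char → Int → Int → List Int
  | 0, _, count, repz => [count, repz]
  | fuel+1, s, count, repz =>
    if s ≠ ['1'] then
      let count := count + 1
      let repz := (PySem.List.pyRange 0 (PySem.Chars.len s) 1).foldl
        (fun acc i => if PySem.List.pyGetD s i ' ' == '0' then acc + 1 else acc) repz
      let s := PySem.Chars.replace s ['0'] []
      let length := PySem.Chars.len s
      let bin := toBin length []
      let s := (PySem.List.slice? bin none none (-1)).getD []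
      aLoop fuel s count repz
    else [count, repz]

def solution (s : String) : List Int :=
  aLoop (s.toList.length + 2) s.toList 0 0

-- ===== PORT B =====
-- one iteration of B's table-building loop: steps.append(steps[p]+1); drops.append(drops[p]+k.bit_length()-p)
-- (the list indexings steps[p] / drops[p] are always in range: 1 ≤ p = popcount(k) < k)
def bStep (t : List Int × List Int) (k : Int) : List Int × List Int :=
  let p : Int := (PySem.Int.bitCount k : Int)
  (t.1 ++ [PySem.List.pyGetD t.1 p 0 + 1],
   t.2 ++ [PySem.List.pyGetD t.2 p 0 + (PySem.Int.bitLength k : Int) - p])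

def solution_alt (s : String) : List Int :=
  if s = "1" then [0, 0]
  else
    let zeros0 : Int := (PySem.Str.count s "0" : Int)
    let ones : Int := PySem.Str.len s - zeros0
    let t := (PySem.List.pyRange 2 (ones + 1) 1).foldl bStep ([0, 0], [0, 0])
    [PySem.List.pyGetD t.1 ones 0 + 1, PySem.List.pyGetD t.2 ones 0 + zeros0]

-- ===== PRECONDITION & SPEC =====
-- Pre_ excludes exactly the strings whose characters are all '0' (including ""):
-- on those A's while loop never terminates (s becomes "" and stays ""), so A returns nothing.
def Pre_solution (s : String) : Prop := s.toList.any (fun c => c != '0') = true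
instance (s : String) : Decidable (Pre_solution s) := by unfold Pre_solution; infer_instance

def pvWitness_solution : String := "1101"

def Spec_solution (s : String) (out : List Int) : Prop := out = solution_alt s
instance (s : String) (out : List Int) : Decidable (Spec_solution s out) := by unfold Spec_solution; infer_instance

-- ===== CLAIM (what is proved, stated in full; the proofs are below) =====
def Claim_equal_solution : Prop := ∀ (s : String), Dom_solution s → Pre_solution s → Spec_solution s (solution s)

-- ===== LEMMAS AND PROOFS =====

lemma bitCount_pos (m : Nat) (h : 0 < m) : 0 < PySem.Int.bitCount (m : Int) := by
  induction m using Nat.strong_induction_on with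
  | _ m ih =>
    rw [PySem.Int.bitCount_natCast h]
    rcases Nat.mod_two_eq_zero_or_one m with h2 | h2
    · have hd : 0 < m / 2 := by omega
      have := ih (m / 2) (Nat.div_lt_self h (by omega)) hd
      omega
    · omega

lemma bitCount_lt (m : Nat) (h : 2 ≤ m) : PySem.Int.bitCount (m : Int) < m := by
  induction m using Nat.strong_induction_on with
  | _ m ih =>
    rw [PySem.Int.bitCount_natCast (by omega)]
    by_cases h4 : m / 2 < 2
    · have h1 : 0 < m / 2 := by omega
      have heq : m / 2 = 1 := by omega
      rw [heq]
      have hone : PySem.Int.bitCount ((1:Nat) : Int) = 1 := by decide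
      rw [hone]
      have : m % 2 < 2 := Nat.mod_lt _ (by omega)
      omega
    · have := ih (m / 2) (Nat.div_lt_self (by omega) (by omega)) (by omega)
      omega

-- the chain invariants: number of further steps / zeros removed from value m down to 1
def chainS (m : Nat) : Nat :=
  if _h : m ≤ 1 then 0 else chainS (PySem.Int.bitCount (m : Int)) + 1
termination_by m
decreasing_by exact bitCount_lt m (by omega)

def chainZ (m : Nat) : Nat :=
  if _h : m ≤ 1 then 0
  else chainZ (PySem.Int.bitCount (m : Int))
       + (PySem.Int.bitLength (m : Int) - PySem.Int.bitCount (m : Int))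
termination_by m
decreasing_by exact bitCount_lt m (by omega)

lemma chainS_base (m : Nat) (h : m ≤ 1) : chainS m = 0 := by rw [chainS]; simp [h]

lemma chainS_step (m : Nat) (h : 2 ≤ m) :
    chainS m = chainS (PySem.Int.bitCount (m : Int)) + 1 := by
  rw [chainS]; simp [Nat.not_le.2 (by omega : 1 < m)]

lemma chainZ_base (m : Nat) (h : m ≤ 1) : chainZ m = 0 := by rw [chainZ]; simp [h]

lemma chainZ_step (m : Nat) (h : 2 ≤ m) :
    chainZ m = chainZ (PySem.Int.bitCount (m : Int))
       + (PySem.Int.bitLength (m : Int) - PySem.Int.bitCount (m : Int)) := by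
  rw [chainZ]; simp [Nat.not_le.2 (by omega : 1 < m)]

lemma replace_go_zero : ∀ (fuel : Nat) (l acc : List Char), l.length ≤ fuel →
    PySem.Chars.replace.go ['0'] [] fuel l acc = acc.reverse ++ l.filter (fun c => c != '0') := by
  intro fuel
  induction fuel with
  | zero => intro l acc h; cases l with
      | nil => simp [PySem.Chars.replace.go]
      | cons c t => simp at h
  | succ k ih =>
    intro l acc h
    cases l with
    | nil => simp [PySem.Chars.replace.go]
    | cons c t =>
      rw [PySem.Chars.replace.go]
      by_cases hc : c = '0'
      · subst hc
        simp [List.isPrefixOf, ih t acc (by simpa using h)]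
      · simp [List.isPrefixOf, Ne.symm hc, ih t (c :: acc) (by simpa using h), hc]

lemma replace_zero (cs : List Char) :
    PySem.Chars.replace cs ['0'] [] = cs.filter (fun c => c != '0') := by
  rw [PySem.Chars.replace]
  simpa using replace_go_zero cs.length cs [] le_rfl

lemma count_go_zero : ∀ (fuel : Nat) (l : List Char) (acc : Nat), l.length ≤ fuel →
    PySem.Chars.count.go ['0'] fuel l acc = acc + l.count '0' := by
  intro fuel
  induction fuel with
  | zero => intro l acc h; cases l with
      | nil => simp [PySem.Chars.count.go]
      | cons c t => simp at h
  | succ k ih =>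
    intro l acc h
    cases l with
    | nil => simp [PySem.Chars.count.go]
    | cons c t =>
      rw [PySem.Chars.count.go]
      by_cases hc : c = '0'
      · subst hc
        simp [List.isPrefixOf, ih t (acc + 1) (by simpa using h)]
        omega
      · simp [List.isPrefixOf, Ne.symm hc, ih t acc (by simpa using h), List.count_cons]
        exact hc

lemma count_zero (cs : List Char) : PySem.Chars.count cs ['0'] = cs.count '0' := by
  rw [PySem.Chars.count]
  simpa using count_go_zero cs.length cs 0 le_rfl

lemma toBin_nonpos {n : Int} (h : ¬ 0 < n) (bin : List Char) : toBin n bin = bin := by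
  rw [toBin]; simp [h]

lemma toBin_append : ∀ (k : Nat) (n : Int), n.toNat ≤ k → ∀ bin, toBin n bin = bin ++ toBin n [] := by
  intro k
  induction k with
  | zero =>
    intro n hn bin
    have h : ¬ 0 < n := by omega
    rw [toBin_nonpos h, toBin_nonpos h]; simp
  | succ k ih =>
    intro n hn bin
    by_cases h : 0 < n
    · conv_lhs => rw [toBin]
      conv_rhs => rw [toBin]
      simp only [h, if_pos]
      have hb : (PySem.Int.floordiv n 2).toNat ≤ k := by
        rw [PySem.Int.floordiv_eq_ediv_of_pos (by omega)]
        omega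
      rw [ih _ hb (bin ++ PySem.Int.toChars (PySem.Int.mod n 2)),
          ih _ hb ([] ++ PySem.Int.toChars (PySem.Int.mod n 2))]
      simp
    · rw [toBin_nonpos h, toBin_nonpos h]; simp

lemma toBin_step (m : Nat) (h : 0 < m) :
    toBin (m : Int) [] = PySem.Int.toChars ((m % 2 : Nat) : Int) ++ toBin ((m / 2 : Nat) : Int) [] := by
  have h2 : (0:Int) < (m:Int) := by exact_mod_cast h
  have hfd : PySem.Int.floordiv (m:Int) 2 = ((m/2 : Nat) : Int) := by
    exact_mod_cast PySem.Int.floordiv_natCast m 2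
  have hmd : PySem.Int.mod (m:Int) 2 = ((m % 2 : Nat) : Int) := by
    exact_mod_cast PySem.Int.mod_natCast m 2
  conv_lhs => rw [toBin]
  simp only [h2, if_pos, hfd, hmd]
  rw [toBin_append ((m/2 : Nat)) _ (by simp) _]
  simp

lemma toChars_mod2 (m : Nat) :
    PySem.Int.toChars ((m % 2 : Nat) : Int) = [if m % 2 = 0 then '0' else '1'] := by
  rcases Nat.mod_two_eq_zero_or_one m with h | h <;> rw [h] <;> decide

lemma toBin_stats : ∀ m : Nat,
    (toBin (m : Int) []).count '1' = PySem.Int.bitCount (m : Int) ∧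
    (toBin (m : Int) []).length = PySem.Int.bitLength (m : Int) ∧
    (toBin (m : Int) []).count '0' = PySem.Int.bitLength (m : Int) - PySem.Int.bitCount (m : Int) := by
  intro m
  induction m using Nat.strong_induction_on with
  | _ m ih =>
    rcases Nat.eq_zero_or_pos m with h0 | hpos
    · subst h0
      rw [toBin_nonpos (by omega)]
      simp [PySem.Int.bitLength_zero, PySem.Int.bitCount_zero]
    · obtain ⟨ih1, ih2, ih3⟩ := ih (m / 2) (Nat.div_lt_self hpos (by omega))
      rw [toBin_step m hpos, toChars_mod2]
      rw [PySem.Int.bitCount_natCast hpos, PySem.Int.bitLength_natCast hpos]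
      have hle := PySem.Int.bitCount_le_bitLength ((m / 2 : Nat) : Int)
      rcases Nat.mod_two_eq_zero_or_one m with h2 | h2 <;>
        rw [h2] <;>
        simp only [List.singleton_append, List.count_cons, List.length_cons,
          beq_iff_eq, ih1, ih2, ih3, if_true,
          (by decide : (if ('0':Char) = '1' then 1 else 0) = 0),
          (by decide : (if ('1':Char) = '0' then 1 else 0) = 0),
          (by decide : (if ('1':Char) = '1' then 1 else 0) = 1),
          (by decide : (if ('0':Char) = '0' then 1 else 0) = 1),
          (by decide : (if (1:Nat) = 0 then '0' else '1') = '1'),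
          (by decide : (if (0:Nat) = 0 then '0' else '1') = '0')] <;>
        refine ⟨by omega, trivial, by omega⟩

lemma bitLength_eq_one_iff (m : Nat) : PySem.Int.bitLength (m : Int) = 1 ↔ m = 1 := by
  constructor
  · intro h
    rcases Nat.eq_zero_or_pos m with h0 | hpos
    · subst h0; simp [PySem.Int.bitLength_zero] at h
    · have h1 := PySem.Int.lt_two_pow_bitLength (m : Int)
      have h2 := PySem.Int.two_pow_bitLength_le (m : Int) (by exact_mod_cast hpos.ne')
      rw [h] at h1 h2
      simp [Int.natAbs_natCast] at h1 h2
      omega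
  · intro h; subst h; decide

lemma toBin_eq_one_iff (m : Nat) : toBin (m : Int) [] = ['1'] ↔ m = 1 := by
  constructor
  · intro h
    have := (toBin_stats m).2.1
    rw [h] at this
    exact (bitLength_eq_one_iff m).1 this.symm
  · intro h; subst h
    rw [toBin_step 1 (by omega)]
    simp [toBin_nonpos]
    decide

lemma reverse_eq_one_iff (xs : List Char) : xs.reverse = ['1'] ↔ xs = ['1'] := by
  constructor
  · intro h
    have := congrArg List.reverse h
    simpa using this
  · intro h; simp [h]

lemma filter_len (cs : List Char) :
    (cs.filter (fun c => c != '0')).length + cs.count '0' = cs.length := by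
  induction cs with
  | nil => simp
  | cons c t ih =>
    by_cases h : c = '0' <;> simp [h, ← ih] <;> omega

-- A's one iteration, stated over the list
lemma aLoop_step (f : Nat) (s : List Char) (hs : s ≠ ['1']) (c r : Int) :
    aLoop (f+1) s c r
      = aLoop f (toBin ((s.length - s.count '0' : Nat) : Int) []).reverse (c + 1)
          (r + (s.count '0' : Int)) := by
  rw [aLoop]
  simp only [hs, ne_eq, not_false_eq_true, if_pos]
  have hfold : (PySem.List.pyRange 0 (PySem.Chars.len s) 1).foldl
      (fun acc i => if PySem.List.pyGetD s i ' ' == '0' then acc + 1 else acc) r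
      = r + (s.count '0' : Int) := by
    rw [show PySem.Chars.len s = ((s.length : Int)) from by simp [PySem.Chars.len_eq]]
    rw [PySem.List.foldl_pyRange_zero_pyGetD' s ' '
      (fun acc ch => if ch == '0' then acc + 1 else acc) r]
    rw [PySem.List.foldl_beq_add_one]
  rw [hfold, replace_zero]
  have hlen : PySem.Chars.len (s.filter (fun c => c != '0'))
      = ((s.length - s.count '0' : Nat) : Int) := by
    have := filter_len s
    simp [PySem.Chars.len_eq]
    omega
  rw [hlen, PySem.List.slice?_none_none_neg_one]
  rfl

-- A's loop computes the chain invariants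
lemma aLoop_chain (m : Nat) (hm : 1 ≤ m) : ∀ (f : Nat), m ≤ f → ∀ (c r : Int),
    aLoop f (toBin (m : Int) []).reverse c r = [c + (chainS m : Int), r + (chainZ m : Int)] := by
  induction m using Nat.strong_induction_on with
  | _ m ih =>
    intro f hf c r
    obtain ⟨g, rfl⟩ : ∃ g, f = g + 1 := ⟨f - 1, by omega⟩
    by_cases h1 : m = 1
    · subst h1
      have hb : toBin ((1:Nat) : Int) [] = ['1'] := (toBin_eq_one_iff 1).2 rfl
      rw [hb]
      rw [aLoop, chainS_base 1 le_rfl, chainZ_base 1 le_rfl]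
      norm_num
    · have hne : (toBin (m : Int) []).reverse ≠ ['1'] := by
        exact fun h => h1 ((toBin_eq_one_iff m).1 ((reverse_eq_one_iff _).1 h))
      rw [aLoop_step g _ hne c r]
      obtain ⟨h1s, h2s, h3s⟩ := toBin_stats m
      have hcount : (toBin (m:Int) []).reverse.count '0' = (toBin (m:Int) []).count '0' :=
        List.count_reverse
      have hlen : (toBin (m:Int) []).reverse.length = (toBin (m:Int) []).length := by simp
      have hle := PySem.Int.bitCount_le_bitLength ((m:Nat) : Int)
      have hm2 : 2 ≤ m := by omega
      have hlt := bitCount_lt m hm2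
      have hpos := bitCount_pos m (by omega)
      have harg : ((toBin (m:Int) []).reverse.length - (toBin (m:Int) []).reverse.count '0' : Nat)
          = PySem.Int.bitCount (m : Int) := by
        rw [hcount, hlen, h2s, h3s]
        omega
      rw [harg]
      rw [ih (PySem.Int.bitCount (m:Int)) hlt hpos g (by omega) (c+1) _]
      rw [chainS_step m hm2, chainZ_step m hm2]
      have : (toBin (m:Int) []).reverse.count '0'
          = PySem.Int.bitLength (m:Int) - PySem.Int.bitCount (m:Int) := by
        rw [hcount, h3s]
      rw [this]
      push_cast [Nat.cast_sub hle]
      simp only [List.cons.injEq, and_true]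
      exact ⟨by ring, by ring⟩

-- B's table, built up to N
def tabl (N : Nat) : List Int × List Int :=
  (PySem.List.pyRange 2 ((N : Int) + 1) 1).foldl bStep ([0, 0], [0, 0])

lemma tabl_spec : ∀ N : Nat, 1 ≤ N →
    (tabl N).1.length = N + 1 ∧ (tabl N).2.length = N + 1 ∧
    ∀ k : Nat, k ≤ N →
      PySem.List.pyGetD (tabl N).1 (k : Int) 0 = (chainS k : Int) ∧
      PySem.List.pyGetD (tabl N).2 (k : Int) 0 = (chainZ k : Int) := by
  intro N
  induction N with
  | zero => intro h; omega
  | succ N ih =>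
    intro _
    by_cases hN : N = 0
    · subst hN
      refine ⟨by decide, by decide, ?_⟩
      intro k hk
      interval_cases k
      · rw [chainS_base 0 (by omega), chainZ_base 0 (by omega)]; decide
      · rw [chainS_base 1 le_rfl, chainZ_base 1 le_rfl]; decide
    · obtain ⟨hl1, hl2, hent⟩ := ih (by omega)
      have hsplit : PySem.List.pyRange 2 ((N + 1 : Nat) : Int) 1 ++ [((N + 1 : Nat) : Int)]
          = PySem.List.pyRange 2 (((N + 1 : Nat) : Int) + 1) 1 := by
        rw [← PySem.List.pyRange_one_succ_right (by push_cast; omega)]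
      have htab : tabl (N + 1) = bStep (tabl N) ((N + 1 : Nat) : Int) := by
        rw [tabl, ← hsplit, List.foldl_append]
        push_cast
        rfl
      set p : Nat := PySem.Int.bitCount ((N + 1 : Nat) : Int) with hp
      have hplt : p < N + 1 := bitCount_lt (N + 1) (by omega)
      have hppos : 0 < p := bitCount_pos (N + 1) (by omega)
      obtain ⟨hep1, hep2⟩ := hent p (by omega)
      have hb : bStep (tabl N) ((N + 1 : Nat) : Int)
          = ((tabl N).1 ++ [(chainS p : Int) + 1],
             (tabl N).2 ++ [(chainZ p : Int) + (PySem.Int.bitLength ((N+1 : Nat) : Int) : Int) - (p : Int)]) := by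
        rw [bStep]
        simp only [← hp, hep1, hep2]
      rw [htab, hb]
      have hle := PySem.Int.bitCount_le_bitLength ((N + 1 : Nat) : Int)
      have hS : (chainS p : Int) + 1 = (chainS (N + 1) : Int) := by
        rw [chainS_step (N + 1) (by omega), ← hp]
        omega
      have hZ : (chainZ p : Int) + (PySem.Int.bitLength ((N+1 : Nat) : Int) : Int) - (p : Int)
          = (chainZ (N + 1) : Int) := by
        rw [chainZ_step (N + 1) (by omega), ← hp]
        have hle' : p ≤ PySem.Int.bitLength ((N + 1 : Nat) : Int) := by rw [hp]; exact hle
        omega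
      refine ⟨by simp [hl1], by simp [hl2], ?_⟩
      intro k hk
      rcases Nat.lt_or_ge k (N + 1) with hk' | hk'
      · obtain ⟨he1, he2⟩ := hent k (by omega)
        rw [PySem.List.pyGetD_natCast] at he1 he2 ⊢
        rw [PySem.List.pyGetD_natCast]
        constructor
        · rw [List.getD_eq_getElem?_getD, List.getElem?_append_left (by omega),
              ← List.getD_eq_getElem?_getD, he1]
        · rw [List.getD_eq_getElem?_getD, List.getElem?_append_left (by omega),
              ← List.getD_eq_getElem?_getD, he2]
      · have hkeq : k = N + 1 := by omega
        subst hkeq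
        have hidx : ∀ (x : Int) (l : List Int), l.length = N + 1 →
            (l ++ [x]).getD (N + 1) 0 = x := by
          intro x l hlen
          rw [List.getD_eq_getElem?_getD, ← hlen, List.getElem?_concat_length]
          rfl
        rw [PySem.List.pyGetD_natCast, PySem.List.pyGetD_natCast,
            hidx _ _ hl1, hidx _ _ hl2]
        exact ⟨hS, hZ⟩

-- ===== VERDICT (by name: the statement is the Claim_ definition above) =====
theorem solution_spec : Claim_equal_solution := by
  intro s _ hpre
  unfold Spec_solution
  by_cases hs : s = "1"
  · subst hs
    decide
  · have h1 : "1".toList = ['1'] := by decide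
    have hl : s.toList ≠ ['1'] := by
      intro h
      exact hs (String.toList_inj.1 (h.trans h1.symm))
    have hzlt : s.toList.count '0' < s.toList.length := by
      rcases lt_or_eq_of_le (List.count_le_length (l := s.toList) (a := '0')) with h | h
      · exact h
      · exfalso
        obtain ⟨c, hc, hcne'⟩ := List.any_eq_true.1 hpre
        have hcne : c ≠ '0' := by simpa using hcne'
        exact hcne ((List.count_eq_length.1 h) c hc).symm
    set z := s.toList.count '0' with hz
    set m := s.toList.length - z with hmdef
    have hm1 : 1 ≤ m := by omega
    rw [solution, aLoop_step _ _ hl, zero_add, zero_add]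
    rw [solution_alt]
    simp only [hs, if_false]
    have hzeros : (PySem.Str.count s "0" : Int) = (z : Int) := by
      rw [PySem.Str.count_eq]
      norm_cast
      exact count_zero s.toList
    have hlen : PySem.Str.len s = (s.toList.length : Int) := by
      simp [PySem.Str.len_eq]
    rw [hzeros, hlen]
    have hn : ((s.toList.length : Int) - (z : Int)) = ((m : Nat) : Int) := by
      rw [hmdef]
      omega
    rw [hn]
    rw [aLoop_chain m hm1 (s.toList.length + 1) (by omega) 1 (z : Int)]
    obtain ⟨_, _, hent⟩ := tabl_spec m hm1
    obtain ⟨he1, he2⟩ := hent m le_rfl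
    rw [show (PySem.List.pyRange 2 ((m:Int) + 1) 1).foldl bStep ([0,0],[0,0]) = tabl m from rfl]
    rw [he1, he2]
    simp [add_comm]
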